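-- pv_equiv track=rewrite | github.com/Soft-Biophysics-Group/frusa_lattice_mc | python/src/analysis/analyze_3d_size.py | get_agg_sizes
-- ===== SOURCE A (Python) =====
-- def get_agg_sizes(aggregates: list[set[int]]) -> dict[int, int]:
--     all_sizes = {}
--     for agg in aggregates:
--         agg_size = len(agg)
--         if agg_size in all_sizes.keys():
--             all_sizes[agg_size] += 1
--         else:
--             all_sizes[agg_size] = 1
--     return all_sizes
-- ===== SOURCE B (Python) =====
-- def get_agg_sizes(aggregates: list[set[int]]) -> dict[int, int]:
--     sizes = [len(agg) for agg in aggregates]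
--     result = {}
--     while sizes:
--         s = sizes[0]
--         rest = [x for x in sizes if x != s]
--         result[s] = len(sizes) - len(rest)
--         sizes = rest
--     return result
-- ===== Notes on version B (the rewrite author's own statement) =====
-- stated objective: alternative
-- what changed: B replaces A's hash-based one-pass counter (check key, increment-or-initialise per element) by a partition-based worklist: repeatedly take the first remaining size as a pivot, filter all its occurrences out of the worklist, and record the length drop as that size's count, until the worklist is empty.
import Mathlib
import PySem

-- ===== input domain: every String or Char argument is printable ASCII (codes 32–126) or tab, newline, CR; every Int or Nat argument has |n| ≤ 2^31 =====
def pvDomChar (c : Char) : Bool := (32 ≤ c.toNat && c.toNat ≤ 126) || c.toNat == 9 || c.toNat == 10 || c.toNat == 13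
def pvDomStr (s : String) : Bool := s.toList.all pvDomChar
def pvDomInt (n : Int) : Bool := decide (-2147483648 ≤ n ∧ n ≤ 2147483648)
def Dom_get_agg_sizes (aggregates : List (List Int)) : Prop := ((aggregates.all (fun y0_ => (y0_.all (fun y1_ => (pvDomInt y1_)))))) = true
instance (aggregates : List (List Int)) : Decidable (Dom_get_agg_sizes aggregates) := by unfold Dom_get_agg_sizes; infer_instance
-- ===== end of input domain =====

-- B: same size-frequency dict, built by a partition worklist (pivot on the first
-- remaining size, filter out all its occurrences, the length drop is its count)
-- instead of A's incremental check-then-increment dict loop. Objective: alternative.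

-- len(agg) where agg is a Python set (the List Int argument models the set's elements)
def pvSize (agg : List Int) : Int := ((PySem.Set.ofList agg).length : Int)

-- ===== PORT A =====
def get_agg_sizes (aggregates : List (List Int)) : List (Int × Int) :=
  (aggregates.foldl
    (fun all_sizes agg =>
      let agg_size := pvSize agg
      if all_sizes.contains agg_size then
        all_sizes.modify agg_size 0 (· + 1)      -- all_sizes[agg_size] += 1
      else
        all_sizes.insert agg_size 1)
    PySem.Dict.empty).items

-- ===== PORT B =====
-- the 'while sizes:' worklist loop of Source B, as well-founded recursion on the worklist length
def pvTally (sizes : List Int) : List (Int × Int) :=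
  match sizes with
  | [] => []
  | s :: t =>
    let rest := (s :: t).filter (fun x => !(x == s))
    (s, ((s :: t).length : Int) - (rest.length : Int)) :: pvTally rest
termination_by sizes.length
decreasing_by
  simp only [List.filter_cons, beq_self_eq_true, Bool.not_true, List.length_cons]
  exact Nat.lt_succ_of_le (List.length_filter_le _ _)

def get_agg_sizes_alt (aggregates : List (List Int)) : List (Int × Int) :=
  pvTally (aggregates.map pvSize)

-- ===== PRECONDITION & SPEC =====
def Spec_get_agg_sizes (aggregates : List (List Int)) (out : List (Int × Int)) : Prop := out = get_agg_sizes_alt aggregates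
instance (aggregates : List (List Int)) (out : List (Int × Int)) : Decidable (Spec_get_agg_sizes aggregates out) := by unfold Spec_get_agg_sizes; infer_instance

-- ===== CLAIM (what is proved, stated in full; the proofs are below) =====
def Claim_equal_get_agg_sizes : Prop := ∀ (aggregates : List (List Int)), Dom_get_agg_sizes aggregates → Spec_get_agg_sizes aggregates (get_agg_sizes aggregates)

-- ===== LEMMAS AND PROOFS =====

-- A's check-then-increment step is exactly the Counter step d.modify x 0 (· + 1).
theorem pv_step_eq (d : PySem.Dict Int Int) (x : Int) :
    (if d.contains x then d.modify x 0 (· + 1) else d.insert x 1) = d.modify x 0 (· + 1) := by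
  by_cases h : d.contains x = true
  · simp [h]
  · have hf : d.contains x = false := by simpa using h
    have hg : d.get? x = none := by
      rw [PySem.Dict.get?_eq_none_iff_contains]; simp [hf]
    simp [hf, PySem.Dict.insert, PySem.Dict.modify, PySem.Dict.getD, hg]

-- filtering out the pivot removes exactly `count` elements
theorem pv_len_filter (l : List Int) (s : Int) :
    (l.filter (fun x => !(x == s))).length + List.count s l = l.length := by
  induction l with
  | nil => simp
  | cons a t ih =>
    by_cases h : a = s
    · subst h; simp; omega
    · simp [h]; omega

-- adding the pivot's occurrences back does not change the accumulated set,
-- once the pivot is already in the accumulator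
theorem pv_foldl_filter (t : List Int) (s : Int) (acc : PySem.Set Int)
    (h : acc.contains s = true) :
    List.foldl PySem.Set.add acc t
      = List.foldl PySem.Set.add acc (t.filter (fun x => !(x == s))) := by
  induction t generalizing acc with
  | nil => rfl
  | cons a t ih =>
    by_cases ha : a = s
    · subst ha
      have hmem : a ∈ acc := by simpa using h
      have hadd : PySem.Set.add acc a = acc := by simp [PySem.Set.add, hmem]
      rw [List.foldl_cons, hadd, ih acc h]
      simp
    · have hmem : s ∈ acc := by simpa using h
      have hcon : (PySem.Set.add acc a).contains s = true := by
        simp only [PySem.Set.add]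
        split <;> simp [hmem]
      have hfc : (a :: t).filter (fun x => !(x == s))
          = a :: t.filter (fun x => !(x == s)) := by
        simp [ha]
      rw [hfc, List.foldl_cons, List.foldl_cons, ih _ hcon]

-- a leading pivot stays in front if no later element equals it
theorem pv_foldl_cons (t : List Int) (s : Int) (b : PySem.Set Int)
    (h : ∀ x ∈ t, x ≠ s) :
    List.foldl PySem.Set.add (s :: b) t = s :: List.foldl PySem.Set.add b t := by
  induction t generalizing b with
  | nil => rfl
  | cons a t ih =>
    have ha : a ≠ s := h a (by simp)
    have hc : (s :: b).contains a = b.contains a := by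
      simp [ha]
    have hstep : PySem.Set.add (s :: b) a = s :: PySem.Set.add b a := by
      by_cases hb : a ∈ b
      · simp [PySem.Set.add, ha, hb]
      · simp [PySem.Set.add, ha, hb]
    rw [List.foldl_cons, List.foldl_cons, hstep,
        ih _ (fun x hx => h x (by simp [hx]))]

-- the partition tally computes the Counter items: first-occurrence keys with counts
theorem pvTally_eq (l : List Int) :
    pvTally l = (PySem.Set.ofList l).map (fun k => (k, (List.count k l : Int))) := by
  induction l using pvTally.induct with
  | case1 => simp [pvTally, PySem.Set.ofList, PySem.Set.empty]
  | case2 s t rest ih =>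
    have hrest : (s :: t).filter (fun x => !(x == s))
        = t.filter (fun x => !(x == s)) := by
      simp
    have hnots : ∀ x ∈ t.filter (fun x => !(x == s)), x ≠ s := by
      intro x hx
      have := List.of_mem_filter hx
      simpa using this
    have hofl : PySem.Set.ofList (s :: t)
        = s :: PySem.Set.ofList (t.filter (fun x => !(x == s))) := by
      show List.foldl PySem.Set.add PySem.Set.empty (s :: t) = _
      rw [List.foldl_cons]
      have hadd : PySem.Set.add PySem.Set.empty s = [s] := by
        simp [PySem.Set.add, PySem.Set.empty]
      rw [hadd, pv_foldl_filter t s [s] (by simp),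
          pv_foldl_cons _ s [] hnots]
      rfl
    have hcount : ((s :: t).length : Int)
        - (((s :: t).filter (fun x => !(x == s))).length : Int)
        = (List.count s (s :: t) : Int) := by
      have hl := pv_len_filter (s :: t) s
      omega
    rw [pvTally]
    rw [hofl, List.map_cons]
    congr 1
    · rw [hcount]
    · have ih' : pvTally (t.filter (fun x => !(x == s)))
          = (PySem.Set.ofList (t.filter (fun x => !(x == s)))).map
              (fun k => (k, (List.count k (t.filter (fun x => !(x == s))) : Int))) :=
        hrest ▸ ih
      rw [hrest, ih']
      apply List.map_congr_left
      intro k hk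
      have hkmem : k ∈ t.filter (fun x => !(x == s)) := by
        simpa using hk
      have hks : k ≠ s := hnots k hkmem
      have hcnt : List.count k (t.filter (fun x => !(x == s)))
          = List.count k (s :: t) := by
        rw [List.count_filter (by simp [hks]), List.count_cons]
        simp [Ne.symm hks]
      rw [hcnt]

-- ===== VERDICT (by name: the statement is the Claim_ definition above) =====
theorem get_agg_sizes_spec : Claim_equal_get_agg_sizes := by
  intro aggregates _
  unfold Spec_get_agg_sizes get_agg_sizes get_agg_sizes_alt
  have h1 : (aggregates.foldl
      (fun all_sizes agg =>
        let agg_size := pvSize agg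
        if all_sizes.contains agg_size then all_sizes.modify agg_size 0 (· + 1)
        else all_sizes.insert agg_size 1)
      PySem.Dict.empty) = PySem.Dict.counter (aggregates.map pvSize) := by
    rw [PySem.Dict.counter_eq_foldl, List.foldl_map]
    congr 1
    funext d agg
    exact pv_step_eq d (pvSize agg)
  rw [h1, PySem.Dict.items_counter, pvTally_eq]
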